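-- pv_equiv track=rewrite | github.com/been-seo/AAA | core/flight_plan.py | _split_into_legs
-- ===== SOURCE A (Python) =====
-- def _split_into_legs(traj, gap_threshold_sec=1800):
--     """궤적을 leg 단위로 분리. on_ground 전환 또는 시간 갭 기준."""
--     legs = []
--     current_leg = []
--
--     for i, (ts, ac) in enumerate(traj):
--         og = ac.get('on_ground', 0)
--
--         # 시간 갭 체크
--         if current_leg:
--             prev_ts = current_leg[-1][0]
--             if ts - prev_ts > gap_threshold_sec:
--                 if current_leg:
--                     legs.append(current_leg)
--                 current_leg = []
--
--         # on_ground → airborne 전환 = 새 leg 시작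
--         if current_leg and og != 1:
--             prev_og = current_leg[-1][1].get('on_ground', 0)
--             if prev_og == 1:
--                 # 착륙 상태 → 이륙: 이전 leg 저장, 새 leg 시작
--                 legs.append(current_leg)
--                 current_leg = []
--
--         current_leg.append((ts, ac))
--
--     if current_leg:
--         legs.append(current_leg)
--
--     return legs
-- ===== SOURCE B (Python) =====
-- def _split_into_legs(traj, gap_threshold_sec=1800):
--     """Build legs back-to-front: walk the trajectory from the LAST point to the
--     first, growing the current (reversed) leg until the pair boundary condition
--     fires, then un-reverse everything.  Correct because a leg boundary depends
--     only on the two consecutive points around it, so the traversal direction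
--     does not matter."""
--     legs_rev = []
--     for ts, ac in reversed(traj):
--         if legs_rev:
--             nts, nac = legs_rev[-1][-1]  # the point just AFTER (ts, ac) in time order
--             boundary = (nts - ts > gap_threshold_sec) or \
--                        (nac.get('on_ground', 0) != 1 and ac.get('on_ground', 0) == 1)
--         else:
--             boundary = True
--         if boundary:
--             legs_rev.append([(ts, ac)])
--         else:
--             legs_rev[-1].append((ts, ac))
--     return [leg[::-1] for leg in reversed(legs_rev)]
-- ===== Notes on version B (the rewrite author's own statement) =====
-- stated objective: alternative
-- what changed: Replaced A's forward mutate-and-flush accumulator by a back-to-front construction: one pass over the REVERSED trajectory grows reversed legs (checking the pair boundary against the point just after the current one), and a final step un-reverses the leg list and each leg; correct because each boundary depends only on the two consecutive points around it, so traversal direction does not matter.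
import Mathlib
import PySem

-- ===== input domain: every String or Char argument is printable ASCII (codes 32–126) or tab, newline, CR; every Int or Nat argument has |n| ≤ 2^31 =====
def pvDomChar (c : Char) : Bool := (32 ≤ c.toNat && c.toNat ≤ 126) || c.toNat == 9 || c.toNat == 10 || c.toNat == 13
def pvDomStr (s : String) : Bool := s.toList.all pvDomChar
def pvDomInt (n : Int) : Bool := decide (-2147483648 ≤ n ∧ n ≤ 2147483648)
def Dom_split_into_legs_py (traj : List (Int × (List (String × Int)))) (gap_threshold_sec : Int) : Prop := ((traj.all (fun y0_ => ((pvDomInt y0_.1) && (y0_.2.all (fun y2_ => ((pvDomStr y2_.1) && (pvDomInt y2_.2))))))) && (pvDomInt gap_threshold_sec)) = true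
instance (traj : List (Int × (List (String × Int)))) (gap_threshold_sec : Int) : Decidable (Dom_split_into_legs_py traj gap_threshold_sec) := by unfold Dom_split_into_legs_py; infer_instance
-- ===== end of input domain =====

-- B builds the legs back-to-front (one pass over the REVERSED trajectory growing
-- reversed legs, then un-reversing); objective: alternative (same O(n) cost).

-- shared tiny helper: ac.get('on_ground', 0) on the association list (first match)
def pvOG (ac : List (String × Int)) : Int :=
  (((ac.find? (fun kv => kv.1 == "on_ground")).map (fun kv => kv.2)).getD 0)

-- ===== PORT A =====
-- one iteration of A's for-loop; state = (legs, current_leg)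
def pvStepA (gap : Int)
    (st : List (List (Int × (List (String × Int)))) × List (Int × (List (String × Int))))
    (x : Int × (List (String × Int))) :
    List (List (Int × (List (String × Int)))) × List (Int × (List (String × Int))) :=
  let og := pvOG x.2
  -- time gap check
  let st1 :=
    if st.2 ≠ [] then
      let prev_ts := (((PySem.List.pyGet? st.2 (-1)).getD (0, [])).1)  -- current_leg[-1][0]; guarded nonempty
      if x.1 - prev_ts > gap then
        ((if st.2 ≠ [] then st.1 ++ [st.2] else st.1), [])
      else st
    else st
  -- on_ground → airborne transition
  let st2 :=
    if st1.2 ≠ [] ∧ og ≠ 1 then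
      let prev_og := pvOG (((PySem.List.pyGet? st1.2 (-1)).getD (0, [])).2)
      if prev_og = 1 then (st1.1 ++ [st1.2], []) else st1
    else st1
  (st2.1, st2.2 ++ [x])

def split_into_legs_py (traj : List (Int × (List (String × Int)))) (gap_threshold_sec : Int) :
    List (List (Int × (List (String × Int)))) :=
  let st := traj.foldl (pvStepA gap_threshold_sec) ([], [])
  if st.2 ≠ [] then st.1 ++ [st.2] else st.1

-- ===== PORT B =====
-- one iteration of B's reversed for-loop; state = legs_rev
def pvStepB (gap : Int)
    (legs_rev : List (List (Int × (List (String × Int)))))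
    (x : Int × (List (String × Int))) :
    List (List (Int × (List (String × Int)))) :=
  let boundary :=
    if legs_rev ≠ [] then
      -- nts, nac = legs_rev[-1][-1]; guarded nonempty
      let n := ((PySem.List.pyGet? ((PySem.List.pyGet? legs_rev (-1)).getD []) (-1)).getD (0, []))
      decide (n.1 - x.1 > gap) || ((!(pvOG n.2 == 1)) && (pvOG x.2 == 1))
    else true
  if boundary then legs_rev ++ [[x]]
  else legs_rev.dropLast ++ [legs_rev.getLastD [] ++ [x]]   -- legs_rev[-1].append(x)

def split_into_legs_py_alt (traj : List (Int × (List (String × Int)))) (gap_threshold_sec : Int) :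
    List (List (Int × (List (String × Int)))) :=
  let legs_rev := traj.reverse.foldl (pvStepB gap_threshold_sec) []   -- for … in reversed(traj)
  legs_rev.reverse.map (fun leg => (PySem.List.slice? leg none none (-1)).getD [])  -- [leg[::-1] for leg in reversed(legs_rev)]

-- ===== PRECONDITION & SPEC =====
def Spec_split_into_legs_py (traj : List (Int × (List (String × Int)))) (gap_threshold_sec : Int) (out : List (List (Int × (List (String × Int))))) : Prop := out = split_into_legs_py_alt traj gap_threshold_sec
instance (traj : List (Int × (List (String × Int)))) (gap_threshold_sec : Int) (out : List (List (Int × (List (String × Int))))) : Decidable (Spec_split_into_legs_py traj gap_threshold_sec out) := by unfold Spec_split_into_legs_py; infer_instance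

-- ===== CLAIM (what is proved, stated in full; the proofs are below) =====
def Claim_equal_split_into_legs_py : Prop := ∀ (traj : List (Int × (List (String × Int)))) (gap_threshold_sec : Int), Dom_split_into_legs_py traj gap_threshold_sec → Spec_split_into_legs_py traj gap_threshold_sec (split_into_legs_py traj gap_threshold_sec)

-- ===== LEMMAS AND PROOFS =====

-- the boundary predicate between consecutive points p (earlier) and c (later)
def pvCut (gap : Int) (p c : Int × (List (String × Int))) : Bool :=
  decide (c.1 - p.1 > gap) || ((!(pvOG c.2 == 1)) && (pvOG p.2 == 1))

-- the canonical partition, by structural recursion from the right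
def pvLegsR (gap : Int) : List (Int × (List (String × Int))) → List (List (Int × (List (String × Int))))
  | [] => []
  | x :: xs =>
    match pvLegsR gap xs with
    | (y :: leg) :: rest =>
      if pvCut gap x y then [x] :: (y :: leg) :: rest else (x :: y :: leg) :: rest
    | other => [x] :: other

lemma pvLegsR_eq (gap : Int) (x : Int × (List (String × Int))) (xs : List (Int × (List (String × Int)))) :
    pvLegsR gap (x :: xs) =
      (match pvLegsR gap xs with
       | (y :: leg) :: rest =>
         if pvCut gap x y then [x] :: (y :: leg) :: rest else (x :: y :: leg) :: rest
       | other => [x] :: other) := rfl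

lemma pvLegsR_cons (gap : Int) (xs : List (Int × (List (String × Int)))) :
    ∀ x, ∃ leg rest, pvLegsR gap (x :: xs) = (x :: leg) :: rest := by
  induction xs with
  | nil => intro x; exact ⟨[], [], rfl⟩
  | cons z t ih =>
    intro x
    obtain ⟨leg, rest, h⟩ := ih z
    by_cases hc : pvCut gap x z
    · exact ⟨[], (z :: leg) :: rest, by rw [pvLegsR_eq, h]; simp [hc]⟩
    · exact ⟨z :: leg, rest, by rw [pvLegsR_eq, h]; simp [hc]⟩

-- glue an accumulated prefix onto the first leg
def pvConsLeg (c : List (Int × (List (String × Int)))) :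
    List (List (Int × (List (String × Int)))) → List (List (Int × (List (String × Int))))
  | [] => [c]
  | l :: rest => (c ++ l) :: rest

-- the cut flags for each element after 'prev'
def pvFlags (gap : Int) (p : Int × (List (String × Int))) :
    List (Int × (List (String × Int))) → List Bool
  | [] => []
  | x :: xs => pvCut gap p x :: pvFlags gap x xs

-- grouping by flags (intermediate form used to bridge A to pvLegsR)
def pvGroupStep (legs : List (List (Int × (List (String × Int)))))
    (xf : (Int × (List (String × Int))) × Bool) :
    List (List (Int × (List (String × Int)))) :=
  if xf.2 || legs.isEmpty then legs ++ [[xf.1]]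
  else legs.dropLast ++ [legs.getLastD [] ++ [xf.1]]

lemma pvStepA_eq (gap : Int) (legs : List (List (Int × (List (String × Int)))))
    (c : List (Int × (List (String × Int)))) (prev x : Int × (List (String × Int))) :
    pvStepA gap (legs, c ++ [prev]) x =
      if pvCut gap prev x then (legs ++ [c ++ [prev]], [x])
      else (legs, (c ++ [prev]) ++ [x]) := by
  simp only [pvStepA, pvCut, PySem.List.pyGet?_neg_one_append_singleton, Option.getD_some]
  by_cases hg : x.1 - prev.1 > gap
  · simp [hg]
  · by_cases ho : pvOG x.2 = 1
    · simp [hg, ho]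
    · by_cases hp : pvOG prev.2 = 1 <;> simp [hg, ho, hp]

-- A's loop, flushed, equals grouping the rest by flags
lemma pvMainA (gap : Int) (rest : List (Int × (List (String × Int)))) :
    ∀ (legs : List (List (Int × (List (String × Int)))))
      (c : List (Int × (List (String × Int)))) (prev : Int × (List (String × Int))),
    (let st := rest.foldl (pvStepA gap) (legs, c ++ [prev]);
     if st.2 ≠ [] then st.1 ++ [st.2] else st.1)
    = (rest.zip (pvFlags gap prev rest)).foldl pvGroupStep (legs ++ [c ++ [prev]]) := by
  induction rest with
  | nil => intro legs c prev; simp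
  | cons x t ih =>
    intro legs c prev
    simp only [pvFlags, List.zip_cons_cons, List.foldl_cons, pvStepA_eq]
    by_cases hc : pvCut gap prev x
    · have := ih (legs ++ [c ++ [prev]]) [] x
      simp only [List.nil_append] at this
      simp [hc, pvGroupStep, this]
    · have h2 := ih legs (c ++ [prev]) x
      simp only [List.append_assoc, List.cons_append, List.nil_append] at h2 ⊢
      simp [hc, pvGroupStep, h2]

-- grouping by flags equals the canonical partition with the prefix glued on
lemma pvFoldFlags (gap : Int) (xs : List (Int × (List (String × Int)))) :
    ∀ (prev : Int × (List (String × Int)))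
      (init : List (List (Int × (List (String × Int)))))
      (c : List (Int × (List (String × Int)))),
    (xs.zip (pvFlags gap prev xs)).foldl pvGroupStep (init ++ [c ++ [prev]])
      = init ++ pvConsLeg c (pvLegsR gap (prev :: xs)) := by
  induction xs with
  | nil => intro prev init c; simp [pvLegsR, pvConsLeg]
  | cons z t ih =>
    intro prev init c
    obtain ⟨leg, rest, hz⟩ := pvLegsR_cons gap t z
    simp only [pvFlags, List.zip_cons_cons, List.foldl_cons]
    by_cases hc : pvCut gap prev z
    · have hstep : pvGroupStep (init ++ [c ++ [prev]]) (z, pvCut gap prev z)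
          = (init ++ [c ++ [prev]]) ++ [[] ++ [z]] := by simp [pvGroupStep, hc]
      rw [hstep, ih z (init ++ [c ++ [prev]]) [], pvLegsR_eq gap prev (z :: t), hz]
      simp [hc, pvConsLeg]
    · have hstep : pvGroupStep (init ++ [c ++ [prev]]) (z, pvCut gap prev z)
          = init ++ [(c ++ [prev]) ++ [z]] := by
        simp [pvGroupStep, hc]
      rw [hstep, ih z init (c ++ [prev]), pvLegsR_eq gap prev (z :: t), hz]
      simp [hc, pvConsLeg]

-- one B step on a state whose last (reversed) leg ends with z
lemma pvStepB_eq (gap : Int) (legs : List (List (Int × (List (String × Int)))))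
    (l : List (Int × (List (String × Int)))) (z x : Int × (List (String × Int))) :
    pvStepB gap (legs ++ [l ++ [z]]) x =
      if pvCut gap x z then (legs ++ [l ++ [z]]) ++ [[x]]
      else legs ++ [l ++ [z] ++ [x]] := by
  have h1 : PySem.List.pyGet? (legs ++ [l ++ [z]]) (-1) = some (l ++ [z]) :=
    PySem.List.pyGet?_neg_one_append_singleton legs (l ++ [z])
  have h2 : PySem.List.pyGet? (l ++ [z]) (-1) = some z :=
    PySem.List.pyGet?_neg_one_append_singleton l z
  simp only [pvStepB, pvCut, h1, h2, Option.getD_some]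
  by_cases hb : (decide (z.1 - x.1 > gap) || ((!(pvOG z.2 == 1)) && (pvOG x.2 == 1))) = true
  · simp [hb]
  · simp [hb]

-- B's reversed loop computes the canonical partition, reversed leg-by-leg
lemma pvMainB (gap : Int) (xs : List (Int × (List (String × Int)))) :
    xs.reverse.foldl (pvStepB gap) [] = ((pvLegsR gap xs).reverse).map List.reverse := by
  induction xs with
  | nil => simp [pvLegsR]
  | cons x t ih =>
    rw [List.reverse_cons, List.foldl_append, ih]
    cases t with
    | nil => simp [pvLegsR, pvStepB]
    | cons z u =>
      obtain ⟨leg, rest, hz⟩ := pvLegsR_cons gap u z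
      rw [hz, pvLegsR_eq gap x (z :: u), hz]
      simp only [List.reverse_cons, List.map_append, List.map_cons, List.map_nil,
        List.foldl_cons, List.foldl_nil, pvStepB_eq]
      by_cases hc : pvCut gap x z
      · simp [hc]
      · simp [hc]

-- ===== VERDICT (by name: the statement is the Claim_ definition above) =====
theorem split_into_legs_py_spec : Claim_equal_split_into_legs_py := by
  intro traj gap _
  unfold Spec_split_into_legs_py split_into_legs_py split_into_legs_py_alt
  rw [pvMainB]
  simp only [PySem.List.slice?_none_none_neg_one, Option.getD_some]
  have hB : (((pvLegsR gap traj).reverse.map List.reverse).reverse.map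
      (fun leg => leg.reverse)) = pvLegsR gap traj := by
    simp [List.map_map]
  rw [hB]
  cases traj with
  | nil => simp [pvLegsR]
  | cons x xs =>
    have hstep : pvStepA gap ([], []) x = ([], [x]) := by simp [pvStepA]
    obtain ⟨leg, rest, hx⟩ := pvLegsR_cons gap xs x
    have hA := pvMainA gap xs [] [] x
    have hF := pvFoldFlags gap xs x [] []
    simp only [List.nil_append] at hA hF
    simp only [List.foldl_cons, hstep, hA, hF, hx, pvConsLeg, List.nil_append]
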